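-- pv_equiv track=rewrite | github.com/yydaily/project-euler-solution | code/872/solution.py | f
-- ===== SOURCE A (Python) =====
-- def f(a, b):
--     if a <= b:
--         return a
--     le = b
--     ri = b
--     i = 1
--     while True:
--         le = ri + 1
--         ri = ri + i
--         if ri >= a:
--             return b + f(a, le)
--         i *= 2
-- ===== SOURCE B (Python) =====
-- def f(a, b):
--     # Closed-form by binary decomposition of t = a - b: the recursion visits
--     # exactly the b-values a - s for each nonzero low-suffix s of t's binary
--     # expansion, so sum a - s over those suffixes (built LSB-up) plus a.
--     if a <= b:
--         return a
--     t = a - b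
--     res = a
--     suffix = 0
--     bit = 1
--     while t > 0:
--         if t % 2 == 1:
--             suffix += bit
--             res += a - suffix
--         t //= 2
--         bit *= 2
--     return res
-- ===== Notes on version B (the rewrite author's own statement) =====
-- stated objective: alternative
-- what changed: Replaced A's recursion with an inner doubling-search loop by a single closed-form pass over the binary digits of a-b: each set bit contributes a minus the low-suffix of a-b ending at that bit, accumulated LSB-up.
import Mathlib
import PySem

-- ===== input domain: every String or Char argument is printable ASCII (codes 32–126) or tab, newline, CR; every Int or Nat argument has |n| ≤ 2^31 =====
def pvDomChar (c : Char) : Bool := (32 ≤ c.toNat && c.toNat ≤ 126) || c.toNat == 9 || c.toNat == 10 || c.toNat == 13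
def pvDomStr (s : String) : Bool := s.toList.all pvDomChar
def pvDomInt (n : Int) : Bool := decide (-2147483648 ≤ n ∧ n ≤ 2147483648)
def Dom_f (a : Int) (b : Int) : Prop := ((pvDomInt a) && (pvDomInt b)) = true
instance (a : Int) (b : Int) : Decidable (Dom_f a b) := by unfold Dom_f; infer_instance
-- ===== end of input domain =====

-- B replaces A's recursion-with-inner-doubling-loop by a single pass over the
-- binary digits of a - b (each set bit contributes a minus a low-suffix of a - b);
-- a different algorithm, no speed claim.
-- Both loops are transliterated with a Nat fuel counter as a totality guard only
-- ((a-b).toNat bounds the iteration counts; proved in the fuel lemmas below).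

-- ===== PORT A =====
-- Python's inner `while True` loop of A: state (le, ri, i) with le = ri + 1 at the
-- point of the test; returns the `le` passed to the recursive call.
def loopA (fuel : Nat) (a : Int) (ri : Int) (i : Int) : Int :=
  match fuel with
  | 0 => ri + 1
  | Nat.succ fl => if ri + i ≥ a then ri + 1 else loopA fl a (ri + i) (2 * i)

def fRec (fuel : Nat) (a : Int) (b : Int) : Int :=
  match fuel with
  | 0 => a
  | Nat.succ fl => if a ≤ b then a else b + fRec fl a (loopA (a - b).toNat a b 1)

def f (a : Int) (b : Int) : Int := fRec (a - b).toNat a b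

-- ===== PORT B =====
-- Source B's `while t > 0` digit loop, carrying (t, res, suffix, bit)
def digitLoop (fuel : Nat) (a : Int) (t : Int) (res : Int) (suffix : Int) (bit : Int) : Int :=
  match fuel with
  | 0 => res
  | Nat.succ fl =>
    if t ≤ 0 then res
    else if PySem.Int.mod t 2 = 1 then
      digitLoop fl a (PySem.Int.floordiv t 2) (res + (a - (suffix + bit))) (suffix + bit) (bit * 2)
    else
      digitLoop fl a (PySem.Int.floordiv t 2) res suffix (bit * 2)

def f_alt (a : Int) (b : Int) : Int :=
  if a ≤ b then a
  else digitLoop (a - b).toNat a (a - b) a 0 1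

-- ===== PRECONDITION & SPEC =====
def Spec_f (a : Int) (b : Int) (out : Int) : Prop := out = f_alt a b
instance (a : Int) (b : Int) (out : Int) : Decidable (Spec_f a b out) := by unfold Spec_f; infer_instance

-- ===== CLAIM (what is proved, stated in full; the proofs are below) =====
def Claim_equal_f : Prop := ∀ (a : Int) (b : Int), Dom_f a b → Spec_f a b (f a b)

-- ===== LEMMAS AND PROOFS =====

-- ghost (proof-side) versions of the two loops, by well-founded recursion:
-- the fuel lemmas identify the ports with them, and the equivalence is proved on them.
def gLoopA (a : Int) (ri : Int) (i : Int) (h : 1 ≤ i) : Int :=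
  if ri + i ≥ a then ri + 1
  else gLoopA a (ri + i) (2 * i) (by omega)
termination_by (a - ri).toNat
decreasing_by omega

theorem gLoopA_bounds (a ri i : Int) (h : 1 ≤ i) (hlt : ri < a) :
    ri < gLoopA a ri i h ∧ gLoopA a ri i h ≤ a := by
  fun_induction gLoopA a ri i h with
  | case1 ri i h hge => omega
  | case2 ri i h hge ih => have := ih (by omega); omega

def gF (a : Int) (b : Int) : Int :=
  if a ≤ b then a
  else b + gF a (gLoopA a b 1 (by norm_num))
termination_by (a - b).toNat
decreasing_by
  have := gLoopA_bounds a b 1 (by norm_num) (by omega)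
  omega

def gDigit (a : Int) (t : Int) (res : Int) (suffix : Int) (bit : Int) : Int :=
  if t ≤ 0 then res
  else if PySem.Int.mod t 2 = 1 then
    gDigit a (PySem.Int.floordiv t 2) (res + (a - (suffix + bit))) (suffix + bit) (bit * 2)
  else
    gDigit a (PySem.Int.floordiv t 2) res suffix (bit * 2)
termination_by t.toNat
decreasing_by
  all_goals
    rw [PySem.Int.floordiv_eq_ediv_of_pos (by omega)]
    omega

-- fuel sufficiency: with fuel ≥ the measure, each port equals its ghost loop
theorem loopA_fuel (fuel : Nat) : ∀ (a ri i : Int) (h : 1 ≤ i),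
    (a - ri).toNat ≤ fuel → loopA fuel a ri i = gLoopA a ri i h := by
  induction fuel with
  | zero =>
    intro a ri i h hf
    rw [gLoopA, if_pos (by omega)]
    rfl
  | succ fl ih =>
    intro a ri i h hf
    rw [gLoopA]
    by_cases hge : ri + i ≥ a
    · rw [if_pos hge]; simp only [loopA, if_pos hge]
    · rw [if_neg hge]
      simp only [loopA, if_neg hge]
      exact ih a (ri + i) (2 * i) (by omega) (by omega)

theorem fRec_fuel (fuel : Nat) : ∀ (a b : Int),
    (a - b).toNat ≤ fuel → fRec fuel a b = gF a b := by
  induction fuel with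
  | zero =>
    intro a b hf
    rw [gF, if_pos (by omega)]
    rfl
  | succ fl ih =>
    intro a b hf
    rw [gF]
    by_cases hle : a ≤ b
    · rw [if_pos hle]; simp only [fRec, if_pos hle]
    · rw [if_neg hle]
      simp only [fRec, if_neg hle]
      have hb := gLoopA_bounds a b 1 (by norm_num) (by omega)
      rw [loopA_fuel (a - b).toNat a b 1 (by norm_num) le_rfl]
      rw [ih a (gLoopA a b 1 (by norm_num)) (by omega)]

theorem digitLoop_fuel (fuel : Nat) : ∀ (a t res suffix bit : Int),
    t.toNat ≤ fuel → digitLoop fuel a t res suffix bit = gDigit a t res suffix bit := by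
  induction fuel with
  | zero =>
    intro a t res suffix bit hf
    rw [gDigit, if_pos (by omega)]
    rfl
  | succ fl ih =>
    intro a t res suffix bit hf
    rw [gDigit]
    by_cases h0 : t ≤ 0
    · rw [if_pos h0]; simp only [digitLoop, if_pos h0]
    · rw [if_neg h0]
      have hdiv : PySem.Int.floordiv t 2 = t / 2 :=
        PySem.Int.floordiv_eq_ediv_of_pos (by omega)
      by_cases hodd : PySem.Int.mod t 2 = 1
      · rw [if_pos hodd]
        simp only [digitLoop, if_neg h0, if_pos hodd]
        exact ih a _ _ _ _ (by rw [hdiv]; omega)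
      · rw [if_neg hodd]
        simp only [digitLoop, if_neg h0, if_neg hodd]
        exact ih a _ _ _ _ (by rw [hdiv]; omega)

-- step lemmas for the ghost digit loop (one iteration of the while loop)
theorem gDigit_nonpos (a t res suffix bit : Int) (h : t ≤ 0) :
    gDigit a t res suffix bit = res := by
  rw [gDigit, if_pos h]

theorem gDigit_odd (a t res suffix bit : Int) (h : 0 < t) (ho : t % 2 = 1) :
    gDigit a t res suffix bit
      = gDigit a ((t - 1) / 2) (res + (a - (suffix + bit))) (suffix + bit) (bit * 2) := by
  rw [gDigit, if_neg (by omega), if_pos (by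
    rw [PySem.Int.mod_eq_emod_of_pos (by omega)]; omega)]
  rw [show PySem.Int.floordiv t 2 = (t - 1) / 2 from by
    rw [PySem.Int.floordiv_eq_ediv_of_pos (by omega)]; omega]

theorem gDigit_even (a t res suffix bit : Int) (h : 0 < t) (he : t % 2 = 0) :
    gDigit a t res suffix bit = gDigit a (t / 2) res suffix (bit * 2) := by
  rw [gDigit, if_neg (by omega), if_neg (by
    rw [PySem.Int.mod_eq_emod_of_pos (by omega)]; omega)]
  rw [PySem.Int.floordiv_eq_ediv_of_pos (by omega)]

-- argument congruence for A's proof-carrying ghost inner loop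
theorem gLoopA_congr (a ri i ri' i' : Int) (h : 1 ≤ i) (h' : 1 ≤ i')
    (hri : ri = ri') (hi : i = i') : gLoopA a ri i h = gLoopA a ri' i' h' := by
  subst hri; subst hi; rfl

-- A's inner loop: from the state after j doublings (ri = b + 2^j - 1, i = 2^j),
-- with 2^(j+k) ≤ a - b < 2^(j+k+1), it returns b + 2^(j+k) (b plus the msb of a - b).
theorem gLoopA_closed (k : Nat) : ∀ (j : Nat) (a b : Int) (h : 1 ≤ (2:Int)^j),
    (2:Int)^(j+k) ≤ a - b → a - b < (2:Int)^(j+k+1) →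
    gLoopA a (b + 2^j - 1) ((2:Int)^j) h = b + 2^(j+k) := by
  induction k with
  | zero =>
    intro j a b h hL hU
    have e : (2:Int)^(j+0+1) = 2 * 2^j := by ring
    rw [gLoopA, if_pos (by omega)]
    omega
  | succ k ih =>
    intro j a b h hL hU
    have e1 : (2:Int)^(j+1) = 2 * 2^j := by ring
    have hmono : (2:Int)^(j+1) ≤ 2^(j+(k+1)) := by
      apply pow_le_pow_right₀ (by norm_num); omega
    rw [gLoopA, if_neg (by omega)]
    have h' : 1 ≤ (2:Int)^(j+1) := one_le_pow₀ (by norm_num)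
    rw [gLoopA_congr a (b + 2^j - 1 + 2^j) (2 * 2^j) (b + 2^(j+1) - 1) ((2:Int)^(j+1))
      (by omega) h' (by omega) (by omega)]
    have := ih (j+1) a b h' (by
        have : j + 1 + k = j + (k+1) := by omega
        rw [this]; exact hL)
      (by
        have : j + 1 + k + 1 = j + (k+1) + 1 := by omega
        rw [this]; exact hU)
    rw [this, show j + 1 + k = j + (k + 1) from by omega]

-- B's digit loop: stripping the most significant bit 2^L of t (t = 2^L + r,
-- 0 ≤ r < 2^L) removes exactly the contribution a - (suffix + bit * t).
theorem gDigit_strip_msb (L : Nat) :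
    ∀ (a t r res suffix bit : Int), t = 2^L + r → 0 ≤ r → r < 2^L →
    gDigit a t res suffix bit = gDigit a r res suffix bit + (a - (suffix + bit * t)) := by
  induction L with
  | zero =>
    intro a t r res suffix bit ht hr hrU
    have h1 : (2:Int)^(0:Nat) = 1 := by norm_num
    have hr0 : r = 0 := by omega
    have ht1 : t = 1 := by omega
    subst hr0; subst ht1
    rw [gDigit_odd a 1 res suffix bit (by omega) (by decide)]
    rw [show ((1:Int) - 1) / 2 = 0 from by decide]
    rw [gDigit_nonpos _ _ _ _ _ (by omega), gDigit_nonpos _ _ _ _ _ (by omega)]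
    ring
  | succ L ih =>
    intro a t r res suffix bit ht hr hrU
    have e : (2:Int)^(L+1) = 2 * 2^L := by ring
    have hpow : (1:Int) ≤ 2^L := one_le_pow₀ (by norm_num)
    have htpos : 0 < t := by omega
    by_cases hodd : t % 2 = 1
    · have hrodd : r % 2 = 1 := by omega
      rw [gDigit_odd a t res suffix bit htpos hodd]
      rw [ih a ((t-1)/2) ((r-1)/2) (res + (a - (suffix + bit))) (suffix + bit) (bit * 2)
        (by omega) (by omega) (by omega)]
      rw [gDigit_odd a r res suffix bit (by omega) hrodd]
      congr 1
      have h2 : 2 * ((t - 1) / 2) = t - 1 := by omega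
      have : bit * 2 * ((t - 1) / 2) = bit * (t - 1) := by
        calc bit * 2 * ((t - 1) / 2) = bit * (2 * ((t - 1) / 2)) := by ring
          _ = bit * (t - 1) := by rw [h2]
      rw [this]; ring
    · have hteven : t % 2 = 0 := by omega
      have hreven : r % 2 = 0 := by omega
      rw [gDigit_even a t res suffix bit htpos hteven]
      rw [ih a (t/2) (r/2) res suffix (bit * 2) (by omega) (by omega) (by omega)]
      have h2 : 2 * (t / 2) = t := by omega
      have hb : bit * 2 * (t / 2) = bit * t := by
        calc bit * 2 * (t / 2) = bit * (2 * (t / 2)) := by ring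
          _ = bit * t := by rw [h2]
      by_cases hr0 : r = 0
      · subst hr0
        rw [show (0:Int)/2 = 0 from by decide]
        rw [gDigit_nonpos _ _ _ _ _ (by omega), gDigit_nonpos _ _ _ _ _ (by omega)]
        rw [hb]
      · rw [gDigit_even a r res suffix bit (by omega) hreven]
        rw [hb]

-- the most significant bit of a positive integer, with its bracket
theorem exists_msb (t : Int) (ht : 0 < t) : ∃ L : Nat, (2:Int)^L ≤ t ∧ t < 2^(L+1) := by
  refine ⟨Nat.log2 t.toNat, ?_, ?_⟩
  · have h1 := Nat.log2_self_le (n := t.toNat) (by omega)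
    have h2 : ((2:Nat)^(Nat.log2 t.toNat) : Int) ≤ (t.toNat : Int) := by exact_mod_cast h1
    push_cast at h2
    omega
  · have h1 := Nat.lt_log2_self (n := t.toNat)
    have h2 : ((t.toNat : Int)) < ((2:Nat)^(Nat.log2 t.toNat + 1) : Int) := by exact_mod_cast h1
    push_cast at h2
    omega

theorem main_eq (n : Nat) : ∀ (a b : Int), a - b = n → gDigit a (a - b) a 0 1 = gF a b := by
  induction n using Nat.strong_induction_on with
  | _ n ih =>
    intro a b hab
    by_cases hle : a ≤ b
    · have hn0 : a - b = 0 := by omega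
      rw [hn0, gDigit_nonpos _ _ _ _ _ (by omega), gF, if_pos hle]
    · have htpos : 0 < a - b := by omega
      obtain ⟨L, hL, hU⟩ := exists_msb (a - b) htpos
      have hpow1 : (1:Int) ≤ 2^L := one_le_pow₀ (by norm_num)
      have hstrip := gDigit_strip_msb L a (a - b) (a - b - 2^L) a 0 1 (by ring) (by omega) (by omega)
      have hres : a - b - 2^L = a - (b + 2^L) := by ring
      have hih := ih ((a - (b + 2^L)).toNat) (by omega) a (b + 2^L) (by omega)
      rw [hstrip, hres, hih]
      have hA : gLoopA a b 1 (by norm_num) = b + 2^L := by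
        have h0 := gLoopA_closed L 0 a b (by norm_num) (by simpa using hL) (by simpa using hU)
        rw [gLoopA_congr a (b + 2^0 - 1) ((2:Int)^0) b 1 (by norm_num) (by norm_num)
          (by norm_num) (by norm_num)] at h0
        rw [h0]; norm_num
      conv_rhs => rw [gF]
      rw [if_neg hle, hA]
      ring

-- ===== VERDICT (by name: the statement is the Claim_ definition above) =====
theorem f_spec : Claim_equal_f := by
  intro a b _
  unfold Spec_f f_alt f
  by_cases hle : a ≤ b
  · rw [if_pos hle]
    have h0 : (a - b).toNat = 0 := by omega
    rw [h0]
    rfl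
  · rw [if_neg hle]
    rw [fRec_fuel (a - b).toNat a b le_rfl]
    rw [digitLoop_fuel (a - b).toNat a (a - b) a 0 1 le_rfl]
    exact (main_eq (a - b).toNat a b (by omega)).symm ▸ rfl
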